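-- pv_equiv track=rewrite | github.com/shortalex12333/Cloud_PMS | api/sql_foundation/filter_grammar.py | _location_to_ilike
-- ===== SOURCE A (Python) =====
-- def _location_to_ilike(canonical_loc: str) -> str:
--     """
--     Generate ILIKE pattern for location matching.
--
--     "4c" → "%4%c%" to match variants
--     "box4a" → "%box%4%a%"
--     """
--     pattern_chars = []
--     prev_type = None
--
--     for char in canonical_loc:
--         curr_type = 'digit' if char.isdigit() else 'alpha'
--
--         # Add % at type transitions
--         if prev_type and curr_type != prev_type:
--             pattern_chars.append('%')
--
--         pattern_chars.append(char)
--         prev_type = curr_type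
--
--     return '%' + ''.join(pattern_chars) + '%'
-- ===== SOURCE B (Python) =====
-- def _location_to_ilike(canonical_loc: str) -> str:
--     # Run-based: split into maximal same-type (digit vs non-digit) runs, join with '%'.
--     runs = []
--     i, n = 0, len(canonical_loc)
--     while i < n:
--         k = canonical_loc[i].isdigit()
--         j = i + 1
--         while j < n and canonical_loc[j].isdigit() == k:
--             j += 1
--         runs.append(canonical_loc[i:j])
--         i = j
--     return '%' + '%'.join(runs) + '%'
-- ===== Notes on version B (the rewrite author's own statement) =====
-- stated objective: alternative
-- what changed: B splits the string into maximal same-type (digit vs non-digit) runs and joins the runs with the percent wildcard, instead of A's per-character scan with a prev_type state variable that inserts the wildcard at each type transition.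
import Mathlib
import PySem

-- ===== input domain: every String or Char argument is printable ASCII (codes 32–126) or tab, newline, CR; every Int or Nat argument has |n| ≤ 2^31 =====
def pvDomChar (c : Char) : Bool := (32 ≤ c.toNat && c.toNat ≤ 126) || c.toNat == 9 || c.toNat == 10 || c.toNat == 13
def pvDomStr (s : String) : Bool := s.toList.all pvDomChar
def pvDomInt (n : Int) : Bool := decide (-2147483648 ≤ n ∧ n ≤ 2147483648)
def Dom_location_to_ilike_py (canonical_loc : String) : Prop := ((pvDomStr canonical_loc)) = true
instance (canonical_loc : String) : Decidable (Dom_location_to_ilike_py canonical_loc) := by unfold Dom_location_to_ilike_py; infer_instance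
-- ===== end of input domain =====

-- B replaces A's per-character state machine by splitting the string into maximal
-- same-type (digit vs non-digit) runs and joining the runs with the percent wildcard (objective: alternative).


-- ===== PORT A =====
-- one loop step: state = (pattern_chars, prev_type); prev_type truthy ⇔ isSome (values are "digit"/"alpha", both truthy)
def pvAStep (st : List String × Option String) (ch : Char) : List String × Option String :=
  let currType : String := if PySem.Chars.isdigit ch then "digit" else "alpha"
  let pcs := if st.2.isSome && (st.2 != some currType) then st.1 ++ ["%"] else st.1
  (pcs ++ [String.ofList [ch]], some currType)

def location_to_ilike_py (canonical_loc : String) : String :=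
  let r := canonical_loc.toList.foldl pvAStep ([], none)
  "%" ++ PySem.Str.join "" r.1 ++ "%"

-- ===== PORT B =====
-- Source B's run extraction: the inner while loop is the maximal takeWhile of same-isdigit chars,
-- canonical_loc[i:j] is the run, i = j advances past it (dropWhile).
def pvRunsB (l : List Char) : List (List Char) :=
  match l with
  | [] => []
  | c :: rest =>
    (c :: rest.takeWhile (fun x => PySem.Chars.isdigit x == PySem.Chars.isdigit c))
      :: pvRunsB (rest.dropWhile (fun x => PySem.Chars.isdigit x == PySem.Chars.isdigit c))
termination_by l.length
decreasing_by simpa using Nat.lt_succ_of_le (List.length_dropWhile_le _ rest)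

def location_to_ilike_py_alt (canonical_loc : String) : String :=
  "%" ++ PySem.Str.join "%" ((pvRunsB canonical_loc.toList).map String.ofList) ++ "%"

-- ===== PRECONDITION & SPEC =====
def Spec_location_to_ilike_py (canonical_loc : String) (out : String) : Prop := out = location_to_ilike_py_alt canonical_loc
instance (canonical_loc : String) (out : String) : Decidable (Spec_location_to_ilike_py canonical_loc out) := by unfold Spec_location_to_ilike_py; infer_instance

-- ===== CLAIM (what is proved, stated in full; the proofs are below) =====
def Claim_equal_location_to_ilike_py : Prop := ∀ (canonical_loc : String), Dom_location_to_ilike_py canonical_loc → Spec_location_to_ilike_py canonical_loc (location_to_ilike_py canonical_loc)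

-- ===== LEMMAS AND PROOFS =====

-- A's tail loop, over List String, with prev type as a Bool (true = digit)
def pvFS (k : Bool) (l : List Char) : List String :=
  match l with
  | [] => []
  | c :: rest =>
    (if PySem.Chars.isdigit c != k then ["%"] else []) ++ [String.ofList [c]]
      ++ pvFS (PySem.Chars.isdigit c) rest

-- character-level version of pvFS
def pvFC (k : Bool) (l : List Char) : List Char :=
  match l with
  | [] => []
  | c :: rest =>
    (if PySem.Chars.isdigit c != k then ['%'] else []) ++ c :: pvFC (PySem.Chars.isdigit c) rest

def pvTypeStr (k : Bool) : String := if k then "digit" else "alpha"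

theorem pvTypeStr_beq (a b : Bool) : (some (pvTypeStr a) != some (pvTypeStr b)) = (a != b) := by
  cases a <;> cases b <;> decide

theorem pvFold_some (l : List Char) (pcs : List String) (k : Bool) :
    (l.foldl pvAStep (pcs, some (pvTypeStr k))).1 = pcs ++ pvFS k l := by
  induction l generalizing pcs k with
  | nil => simp [pvFS]
  | cons c rest ih =>
    simp only [List.foldl_cons, pvAStep, pvFS]
    rw [show (some (pvTypeStr k) != some (if PySem.Chars.isdigit c then "digit" else "alpha"))
          = (k != PySem.Chars.isdigit c) from pvTypeStr_beq k (PySem.Chars.isdigit c)]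
    have hts : ∀ b : Bool, (if b = true then "digit" else "alpha") = pvTypeStr b := fun b => rfl
    by_cases h : PySem.Chars.isdigit c = k
    · simp [h, hts, ih]
    · have hne : (k != PySem.Chars.isdigit c) = true := by
        cases k <;> cases hc : PySem.Chars.isdigit c <;> simp_all
      have hne' : (PySem.Chars.isdigit c != k) = true := by
        cases k <;> cases hc : PySem.Chars.isdigit c <;> simp_all
      simp [hne, hne', hts, ih]

theorem pvFold_chars (l : List Char) :
    (l.foldl pvAStep ([], none)).1 =
      match l with
      | [] => []
      | c :: rest => [String.ofList [c]] ++ pvFS (PySem.Chars.isdigit c) rest := by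
  cases l with
  | nil => rfl
  | cons c rest =>
    simp only [List.foldl_cons, pvAStep]
    have : (if PySem.Chars.isdigit c then "digit" else "alpha") = pvTypeStr (PySem.Chars.isdigit c) := rfl
    simp [this, pvFold_some]

theorem pvFS_flatten (k : Bool) (l : List Char) :
    ((pvFS k l).map String.toList).flatten = pvFC k l := by
  induction l generalizing k with
  | nil => rfl
  | cons c rest ih =>
    by_cases h : (PySem.Chars.isdigit c != k) = true <;> simp [pvFS, pvFC, h, ih]

theorem pvFC_same_run (t r : List Char) (k : Bool) (h : ∀ x ∈ t, PySem.Chars.isdigit x = k) :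
    pvFC k (t ++ r) = t ++ pvFC k r := by
  induction t with
  | nil => rfl
  | cons x t' ih =>
    have hx : PySem.Chars.isdigit x = k := h x (by simp)
    simp [pvFC, hx, ih (fun y hy => h y (by simp [hy]))]

theorem pvIntercalate_cons_cons (sep x y : List Char) (zs : List (List Char)) :
    List.intercalate sep (x :: y :: zs) = x ++ (sep ++ List.intercalate sep (y :: zs)) := by
  simp [List.intercalate, List.intersperse]

theorem pvIntercalate_nil (xs : List (List Char)) : List.intercalate [] xs = xs.flatten := by
  induction xs with
  | nil => rfl
  | cons x xs ih =>
    cases xs with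
    | nil => simp [List.intercalate]
    | cons y zs => rw [pvIntercalate_cons_cons, ih]; simp

-- the core: A's transition-marked character stream = B's runs joined by '%'
theorem pvCore (l : List Char) :
    (match l with
     | [] => ([] : List Char)
     | c :: rest => c :: pvFC (PySem.Chars.isdigit c) rest) =
    List.intercalate ['%'] (pvRunsB l) := by
  induction hn : l.length using Nat.strong_induction_on generalizing l with
  | _ n ih =>
    cases l with
    | nil => simp [pvRunsB, List.intercalate]
    | cons c rest =>
      rw [pvRunsB]
      show c :: pvFC (PySem.Chars.isdigit c) rest = _
      set p := fun x => PySem.Chars.isdigit x == PySem.Chars.isdigit c with hp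
      have hsplit : rest.takeWhile p ++ rest.dropWhile p = rest := List.takeWhile_append_dropWhile
      have htake : ∀ x ∈ rest.takeWhile p, PySem.Chars.isdigit x = PySem.Chars.isdigit c := by
        intro x hx
        have := List.mem_takeWhile_imp hx
        simpa [hp] using this
      have hfc : pvFC (PySem.Chars.isdigit c) rest
          = rest.takeWhile p ++ pvFC (PySem.Chars.isdigit c) (rest.dropWhile p) := by
        conv_lhs => rw [← hsplit]
        exact pvFC_same_run _ _ _ htake
      cases hr : rest.dropWhile p with
      | nil =>
        rw [hfc, hr]
        simp [pvFC, pvRunsB, List.intercalate]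
      | cons c' r' =>
        have hc' : p c' = false := by
          have := List.head_dropWhile_not p (l := rest) (by simp [hr])
          simpa [hr] using this
        have hne : (PySem.Chars.isdigit c' != PySem.Chars.isdigit c) = true := by
          simpa [hp] using hc'
        have hlen : (c' :: r').length < n := by
          rw [← hn, ← hr]
          simpa using Nat.lt_succ_of_le (List.length_dropWhile_le p rest)
        have ihr : c' :: pvFC (PySem.Chars.isdigit c') r'
            = List.intercalate ['%'] (pvRunsB (c' :: r')) := ih _ hlen (c' :: r') rfl
        have hruns_ne : pvRunsB (c' :: r') ≠ [] := by rw [pvRunsB]; simp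
        obtain ⟨y, zs, hyz⟩ := List.exists_cons_of_ne_nil hruns_ne
        rw [hfc, hr, hyz, pvIntercalate_cons_cons]
        rw [hyz] at ihr
        simp only [pvFC, hne]
        rw [← ihr]
        simp

-- ===== VERDICT (by name: the statement is the Claim_ definition above) =====
theorem location_to_ilike_py_spec : Claim_equal_location_to_ilike_py := by
  intro s _
  unfold Spec_location_to_ilike_py
  have hA : location_to_ilike_py s
      = "%" ++ PySem.Str.join "" (s.toList.foldl pvAStep ([], none)).1 ++ "%" := rfl
  have hB : location_to_ilike_py_alt s
      = "%" ++ PySem.Str.join "%" ((pvRunsB s.toList).map String.ofList) ++ "%" := rfl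
  rw [hA, hB]
  congr 2
  apply String.toList_inj.mp
  rw [PySem.Str.toList_join, PySem.Str.toList_join]
  have hmk : ((pvRunsB s.toList).map String.ofList).map String.toList = pvRunsB s.toList := by
    simp [List.map_map, Function.comp_def]
  rw [hmk]
  show List.intercalate [] _ = List.intercalate ['%'] _
  rw [← pvCore s.toList, pvFold_chars]
  cases s.toList with
  | nil => rfl
  | cons c rest =>
    rw [pvIntercalate_nil]
    simp [pvFS_flatten]
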